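-- pv_equiv track=rewrite | github.com/suryakumar-nk/learning_workspace | python/assignments/Assignment3.py | splitsum
-- ===== SOURCE A (Python) =====
-- def splitsum(list):
--     pos = 0
--     neg = 0
--     for i in list:
--         if i<0:
--             neg = neg + (i*i*i)
--         else:
--             pos = pos + (i*i)
--     return [pos,neg]
-- ===== SOURCE B (Python) =====
-- def splitsum(list):
--     # Sort ascending, binary-search the boundary between negatives and
--     # non-negatives (sums are order-independent), then sum the two slices.
--     s = sorted(list)
--     lo, hi = 0, len(s)
--     while lo < hi:
--         mid = (lo + hi) // 2
--         if s[mid] < 0: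
--             lo = mid + 1
--         else:
--             hi = mid
--     neg = sum(x * x * x for x in s[:lo])
--     pos = sum(x * x for x in s[lo:])
--     return [pos, neg]
-- ===== Notes on version B (the rewrite author's own statement) =====
-- stated objective: alternative
-- what changed: Instead of one branched accumulating pass, B sorts the list, locates the negative/non-negative boundary by hand-written binary search, and sums cubes over the negative prefix slice and squares over the non-negative suffix slice (correct because both sums are order-independent).
import Mathlib
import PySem

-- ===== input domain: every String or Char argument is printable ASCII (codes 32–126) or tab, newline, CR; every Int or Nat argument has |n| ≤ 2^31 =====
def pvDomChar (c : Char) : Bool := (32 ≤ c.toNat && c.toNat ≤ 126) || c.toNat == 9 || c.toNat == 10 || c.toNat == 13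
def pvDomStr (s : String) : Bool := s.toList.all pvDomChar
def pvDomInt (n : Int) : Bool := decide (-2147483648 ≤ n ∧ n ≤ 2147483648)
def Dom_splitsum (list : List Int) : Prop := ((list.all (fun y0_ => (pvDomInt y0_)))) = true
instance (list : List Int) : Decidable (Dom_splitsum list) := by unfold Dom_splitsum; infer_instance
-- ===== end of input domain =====

-- B replaces A's single branched pass by sort + binary-search split + two slice sums (alternative algorithm, same values).

-- ===== PORT A =====
-- foldl over the same (pos, neg) pair A's loop maintains
def splitsum (list : List Int) : List Int :=
  let st := list.foldl (fun (pn : Int × Int) i =>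
    if i < 0 then (pn.1, pn.2 + i * i * i) else (pn.1 + i * i, pn.2)) (0, 0)
  [st.1, st.2]

-- ===== PORT B =====
-- Source B's while-loop binary search; lo and hi are nonnegative Python ints with lo ≤ hi,
-- so Nat arithmetic and Nat division coincide with Python's // here (exact on this domain).
def splitsumBsearch (s : List Int) (lo hi : Nat) : Nat :=
  if h : lo < hi then
    let mid := (lo + hi) / 2
    if PySem.List.pyGetD s (mid : Int) 0 < 0 then splitsumBsearch s (mid + 1) hi
    else splitsumBsearch s lo mid
  else lo
termination_by hi - lo
decreasing_by all_goals omega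

-- sorted; binary search for the first non-negative index; cube-sum the slice s[:lo], square-sum s[lo:]
def splitsum_alt (list : List Int) : List Int :=
  let s := PySem.List.sorted list id false
  let lo := splitsumBsearch s 0 s.length
  let neg := ((PySem.List.slice s none (some (lo : Int))).map (fun x => x * x * x)).sum
  let pos := ((PySem.List.slice s (some (lo : Int)) none).map (fun x => x * x)).sum
  [pos, neg]

-- ===== PRECONDITION & SPEC =====
def Spec_splitsum (list : List Int) (out : List Int) : Prop := out = splitsum_alt list
instance (list : List Int) (out : List Int) : Decidable (Spec_splitsum list out) := by unfold Spec_splitsum; infer_instance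

-- ===== CLAIM =====
def Claim_equal_splitsum : Prop := ∀ (list : List Int), Dom_splitsum list → Spec_splitsum list (splitsum list)

-- ===== LEMMAS AND PROOFS =====

-- A's fold computes the two sign-filtered sums
lemma splitsum_fold (l : List Int) (p n : Int) :
    l.foldl (fun (pn : Int × Int) i =>
      if i < 0 then (pn.1, pn.2 + i * i * i) else (pn.1 + i * i, pn.2)) (p, n)
    = (p + ((l.filter (fun i => decide (0 ≤ i))).map (fun i => i * i)).sum,
       n + ((l.filter (fun i => decide (i < 0))).map (fun i => i * i * i)).sum) := by
  induction l generalizing p n with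
  | nil => simp
  | cons x xs ih =>
    by_cases hx : x < 0 <;>
      simp [List.foldl, hx, ih, le_of_not_gt] <;> ring_nf

-- the binary search returns a split point: negatives strictly below it, non-negatives from it on
lemma splitsumBsearch_spec (s : List Int) (hs : s.Pairwise (· ≤ ·)) (lo hi : Nat)
    (hlh : lo ≤ hi) (hhl : hi ≤ s.length)
    (hneg : ∀ i, i < lo → s.getD i 0 < 0)
    (hpos : ∀ i, hi ≤ i → i < s.length → 0 ≤ s.getD i 0) :
    splitsumBsearch s lo hi ≤ s.length ∧
    (∀ i, i < splitsumBsearch s lo hi → s.getD i 0 < 0) ∧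
    (∀ i, splitsumBsearch s lo hi ≤ i → i < s.length → 0 ≤ s.getD i 0) := by
  have hidx : ∀ i j (hi' : i < s.length) (hj : j < s.length), i ≤ j → s[i] ≤ s[j] := by
    intro i j hi' hj hij
    rcases Nat.lt_or_eq_of_le hij with h | h
    · exact List.pairwise_iff_getElem.mp hs i j hi' hj h
    · subst h; exact le_refl _
  unfold splitsumBsearch
  by_cases h : lo < hi
  · simp only [h, dif_pos]
    have hmidlt : (lo + hi) / 2 < s.length := by omega
    have hget : PySem.List.pyGetD s (((lo + hi) / 2 : Nat) : Int) 0 = s.getD ((lo + hi) / 2) 0 :=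
      PySem.List.pyGetD_natCast s ((lo + hi) / 2) 0
    by_cases hm : s.getD ((lo + hi) / 2) 0 < 0
    · rw [hget, if_pos hm]
      refine splitsumBsearch_spec s hs ((lo + hi) / 2 + 1) hi (by omega) hhl ?_ hpos
      intro i hilt
      have hi' : i < s.length := by omega
      rw [List.getD_eq_getElem s 0 hi']
      have hm' : s[(lo + hi) / 2] < 0 := by
        rwa [List.getD_eq_getElem s 0 hmidlt] at hm
      exact lt_of_le_of_lt (hidx i ((lo + hi) / 2) hi' hmidlt (by omega)) hm'
    · rw [hget, if_neg hm]
      refine splitsumBsearch_spec s hs lo ((lo + hi) / 2) (by omega) (by omega) hneg ?_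
      intro i hle hilt
      rw [List.getD_eq_getElem s 0 hilt]
      have hm' : 0 ≤ s[(lo + hi) / 2] := by
        rw [List.getD_eq_getElem s 0 hmidlt] at hm; omega
      exact le_trans hm' (hidx ((lo + hi) / 2) i hmidlt hilt hle)
  · simp only [h, dif_neg, not_false_iff]
    exact ⟨by omega, hneg, fun i hi' => hpos i (by omega)⟩
termination_by hi - lo
decreasing_by all_goals omega

-- a split point turns the two sign filters into take/drop
lemma filter_eq_take_drop (s : List Int) (k : Nat) (hk : k ≤ s.length)
    (hneg : ∀ i, i < k → s.getD i 0 < 0)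
    (hpos : ∀ i, k ≤ i → i < s.length → 0 ≤ s.getD i 0) :
    s.filter (fun i => decide (i < 0)) = s.take k ∧
    s.filter (fun i => decide (0 ≤ i)) = s.drop k := by
  have htake : ∀ x ∈ s.take k, x < 0 := by
    intro x hx
    obtain ⟨i, hi, hget⟩ := List.getElem_of_mem hx
    have hlen : i < k := by simp at hi; omega
    have hi' : i < s.length := by omega
    have : (s.take k)[i] = s[i] := List.getElem_take
    rw [this] at hget
    have := hneg i hlen
    rw [List.getD_eq_getElem s 0 hi'] at this
    omega
  have hdrop : ∀ x ∈ s.drop k, 0 ≤ x := by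
    intro x hx
    obtain ⟨i, hi, hget⟩ := List.getElem_of_mem hx
    have hi2 : k + i < s.length := by simp at hi; omega
    have : (s.drop k)[i] = s[k + i] := List.getElem_drop
    rw [this] at hget
    have := hpos (k + i) (by omega) hi2
    rw [List.getD_eq_getElem s 0 hi2] at this
    omega
  constructor
  · calc s.filter (fun i => decide (i < 0))
        = (s.take k ++ s.drop k).filter (fun i => decide (i < 0)) := by rw [List.take_append_drop]
      _ = s.take k ++ [] := by
          rw [List.filter_append]
          congr 1
          · exact List.filter_eq_self.mpr (fun x hx => by simpa using htake x hx)
          · exact List.filter_eq_nil_iff.mpr (fun x hx => by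
              have := hdrop x hx; simp; omega)
      _ = s.take k := by simp
  · calc s.filter (fun i => decide (0 ≤ i))
        = (s.take k ++ s.drop k).filter (fun i => decide (0 ≤ i)) := by rw [List.take_append_drop]
      _ = [] ++ s.drop k := by
          rw [List.filter_append]
          congr 1
          · exact List.filter_eq_nil_iff.mpr (fun x hx => by
              have := htake x hx; simp; omega)
          · exact List.filter_eq_self.mpr (fun x hx => by simpa using hdrop x hx)
      _ = s.drop k := by simp

-- ===== VERDICT =====
theorem splitsum_spec : Claim_equal_splitsum := by
  intro l _
  unfold Spec_splitsum splitsum splitsum_alt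
  dsimp only
  set s := PySem.List.sorted l id false with hs_def
  have hperm : s.Perm l := PySem.List.sorted_perm l id false
  have hsorted : s.Pairwise (· ≤ ·) := by
    have := PySem.List.sorted_pairwise (xs := l) (key := id)
    simpa using this
  obtain ⟨hk, hneg, hpos⟩ :=
    splitsumBsearch_spec s hsorted 0 s.length (by omega) (le_refl _)
      (fun i hi => by omega) (fun i h1 h2 => by omega)
  set k := splitsumBsearch s 0 s.length with hk_def
  obtain ⟨hft, hfd⟩ := filter_eq_take_drop s k hk hneg hpos
  have hslice1 : PySem.List.slice s none (some (k : Int)) = s.take k :=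
    PySem.List.slice_to_natCast s k
  have hslice2 : PySem.List.slice s (some (k : Int)) none = s.drop k :=
    PySem.List.slice_from_natCast s k
  have hfilt_perm_neg : (s.filter (fun i => decide (i < 0))).Perm (l.filter (fun i => decide (i < 0))) :=
    hperm.filter _
  have hfilt_perm_pos : (s.filter (fun i => decide (0 ≤ i))).Perm (l.filter (fun i => decide (0 ≤ i))) :=
    hperm.filter _
  have hsum_neg : ((s.take k).map (fun x => x * x * x)).sum
      = ((l.filter (fun i => decide (i < 0))).map (fun i => i * i * i)).sum := by
    rw [← hft]; exact (hfilt_perm_neg.map _).sum_eq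
  have hsum_pos : ((s.drop k).map (fun x => x * x)).sum
      = ((l.filter (fun i => decide (0 ≤ i))).map (fun i => i * i)).sum := by
    rw [← hfd]; exact (hfilt_perm_pos.map _).sum_eq
  simp only [hslice1, hslice2, splitsum_fold l 0 0, zero_add]
  rw [hsum_neg, hsum_pos]
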